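-- pv_equiv track=rewrite | github.com/vincent-haoy/YinshAI | agents/t_032/feature_weight1.py | count_marker_one_line
-- ===== SOURCE A (Python) =====
-- EMPTY    = 0
--
-- CNTR_0   = 2
--
-- CNTR_1   = 4
--
-- def count_marker_one_line(board,positions,pos,start_idx,end_idx,only_my_marker):
--     cnt = 0
--     op_cnt = 0
--     start_cnt = False
--     for i in range(start_idx, end_idx):
--         marker = board[positions[i]]
--         if positions[i] == pos:
--             break
--         elif start_cnt:
--             if marker == CNTR_0:
--                 cnt += 1
--             elif marker == CNTR_1:
--                 op_cnt += 1
--         elif marker == EMPTY: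
--             start_cnt = True
--         else:
--             cnt = 0
--             op_cnt = 0
--     if not only_my_marker:
--         cnt += op_cnt
--     return cnt
-- ===== SOURCE B (Python) =====
-- EMPTY    = 0
-- CNTR_0   = 2
-- CNTR_1   = 4
--
-- def count_marker_one_line(board, positions, pos, start_idx, end_idx, only_my_marker):
--     # Materialise the line's markers up to the pos break, then answer with
--     # list primitives: first EMPTY via .index, tallies via .count on the tail.
--     markers = []
--     for i in range(start_idx, end_idx):
--         p = positions[i]
--         m = board[p]
--         if p == pos:
--             break
--         markers.append(m)
--     if EMPTY not in markers:
--         return 0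
--     tail = markers[markers.index(EMPTY) + 1:]
--     cnt = tail.count(CNTR_0)
--     if not only_my_marker:
--         cnt += tail.count(CNTR_1)
--     return cnt
-- ===== Notes on version B (the rewrite author's own statement) =====
-- stated objective: alternative
-- what changed: Replaces A's flag-and-reset state machine with a materialise-then-query design: gather the markers up to the pos break into a list, then locate the first EMPTY with list.index and tally CNTR_0/CNTR_1 on the tail slice with list.count, with no running accumulators or reset logic.
import Mathlib
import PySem

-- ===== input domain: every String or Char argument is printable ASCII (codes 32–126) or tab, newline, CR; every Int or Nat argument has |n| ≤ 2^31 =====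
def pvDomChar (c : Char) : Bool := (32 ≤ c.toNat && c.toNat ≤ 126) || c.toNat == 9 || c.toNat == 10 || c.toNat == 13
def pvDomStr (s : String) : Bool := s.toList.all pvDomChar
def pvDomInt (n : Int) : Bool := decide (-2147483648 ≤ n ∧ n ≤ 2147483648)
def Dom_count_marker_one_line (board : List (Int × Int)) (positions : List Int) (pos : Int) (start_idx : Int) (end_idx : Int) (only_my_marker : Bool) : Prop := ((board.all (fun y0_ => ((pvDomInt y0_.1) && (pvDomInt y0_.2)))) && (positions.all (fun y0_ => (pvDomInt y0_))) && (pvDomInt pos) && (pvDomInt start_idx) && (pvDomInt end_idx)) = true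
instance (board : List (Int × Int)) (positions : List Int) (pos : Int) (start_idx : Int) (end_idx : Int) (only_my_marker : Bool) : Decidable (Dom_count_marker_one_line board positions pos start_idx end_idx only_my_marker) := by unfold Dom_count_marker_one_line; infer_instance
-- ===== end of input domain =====

-- B replaces A's flag-and-reset state machine with materialise-then-query:
-- gather the markers up to the pos break, then list.index / list.count; objective: alternative.

-- ===== PORT A =====
-- A's loop 'for i in range(start_idx, end_idx)' ported as index recursion with fuel
-- (end_idx - start_idx).toNat = the number of range iterations; state (cnt, op_cnt, start_cnt);
-- break returns the state. positions[i] / board[...] ported with pyGet? / Dict.get?; the .getD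
-- defaults are never reached inside Pre_.
def pvALoop (board : List (Int × Int)) (positions : List Int) (pos : Int) : Nat → Int → Int → Int → Bool → Int × Int
  | 0, _, cnt, op_cnt, _ => (cnt, op_cnt)
  | fuel + 1, i, cnt, op_cnt, start_cnt =>
    let p := (PySem.List.pyGet? positions i).getD 0
    let marker := ((PySem.Dict.mk board).get? p).getD (-1)
    if p = pos then (cnt, op_cnt)
    else if start_cnt then
      if marker = 2 then pvALoop board positions pos fuel (i + 1) (cnt + 1) op_cnt start_cnt
      else if marker = 4 then pvALoop board positions pos fuel (i + 1) cnt (op_cnt + 1) start_cnt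
      else pvALoop board positions pos fuel (i + 1) cnt op_cnt start_cnt
    else if marker = 0 then pvALoop board positions pos fuel (i + 1) cnt op_cnt true
    else pvALoop board positions pos fuel (i + 1) 0 0 start_cnt

def count_marker_one_line (board : List (Int × Int)) (positions : List Int) (pos : Int) (start_idx : Int) (end_idx : Int) (only_my_marker : Bool) : Int :=
  let r := pvALoop board positions pos (end_idx - start_idx).toNat start_idx 0 0 false
  if only_my_marker then r.1 else r.1 + r.2

-- ===== PORT B =====
-- Source B's gathering loop: collect the marker of each cell until the pos break or the end.
def pvGather (board : List (Int × Int)) (positions : List Int) (pos : Int) : Nat → Int → List Int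
  | 0, _ => []
  | fuel + 1, i =>
    let p := (PySem.List.pyGet? positions i).getD 0
    let m := ((PySem.Dict.mk board).get? p).getD (-1)
    if p = pos then []
    else m :: pvGather board positions pos fuel (i + 1)

-- 'EMPTY not in markers' + 'markers.index(EMPTY)' ported together as index? (none ↔ not in);
-- 'markers[idx+1:]' as PySem.List.slice; '.count' as PySem.List.count.
def count_marker_one_line_alt (board : List (Int × Int)) (positions : List Int) (pos : Int) (start_idx : Int) (end_idx : Int) (only_my_marker : Bool) : Int :=
  let markers := pvGather board positions pos (end_idx - start_idx).toNat start_idx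
  match PySem.List.index? markers 0 with
  | none => 0
  | some k =>
    let tail := PySem.List.slice markers (some ((k : Int) + 1)) none
    let cnt : Int := (PySem.List.count tail 2 : Int)
    if only_my_marker then cnt else cnt + (PySem.List.count tail 4 : Int)

-- ===== PRECONDITION & SPEC =====
-- Pre_ excludes exactly the inputs where Python A raises (IndexError/KeyError): the loop reaches an
-- index i (no earlier positions[j] == pos break) whose positions[i] or board[positions[i]] fails.
-- Ranges are clamped to the valid index window [-len, len) (indices beyond it always raise), so the
-- condition is checkable without walking a huge range.
def Pre_count_marker_one_line (board : List (Int × Int)) (positions : List Int) (pos : Int) (start_idx : Int) (end_idx : Int) (only_my_marker : Bool) : Prop :=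
  end_idx ≤ start_idx ∨
  (-(positions.length : Int) ≤ start_idx ∧ start_idx < (positions.length : Int) ∧
    (∀ i ∈ PySem.List.pyRange (max start_idx (-((positions.length : Int) + 1))) (min end_idx (positions.length : Int)) 1,
      (∀ j ∈ PySem.List.pyRange (max start_idx (-((positions.length : Int) + 1))) i 1, PySem.List.pyGet? positions j ≠ some pos) →
      ((PySem.List.pyGet? positions i).bind (fun p => (PySem.Dict.mk board).get? p)).isSome = true) ∧
    ((positions.length : Int) < end_idx →
      ∃ j ∈ PySem.List.pyRange (max start_idx (-((positions.length : Int) + 1))) (positions.length : Int) 1, PySem.List.pyGet? positions j = some pos))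
instance (board : List (Int × Int)) (positions : List Int) (pos : Int) (start_idx : Int) (end_idx : Int) (only_my_marker : Bool) : Decidable (Pre_count_marker_one_line board positions pos start_idx end_idx only_my_marker) := by unfold Pre_count_marker_one_line; infer_instance

def pvWitness_count_marker_one_line : (List (Int × Int)) × List Int × Int × Int × Int × Bool := ([(0, 0)], [0], 1, 0, 1, true)

def Spec_count_marker_one_line (board : List (Int × Int)) (positions : List Int) (pos : Int) (start_idx : Int) (end_idx : Int) (only_my_marker : Bool) (out : Int) : Prop := out = count_marker_one_line_alt board positions pos start_idx end_idx only_my_marker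
instance (board : List (Int × Int)) (positions : List Int) (pos : Int) (start_idx : Int) (end_idx : Int) (only_my_marker : Bool) (out : Int) : Decidable (Spec_count_marker_one_line board positions pos start_idx end_idx only_my_marker out) := by unfold Spec_count_marker_one_line; infer_instance

-- ===== CLAIM =====
def Claim_equal_count_marker_one_line : Prop := ∀ (board : List (Int × Int)) (positions : List Int) (pos : Int) (start_idx : Int) (end_idx : Int) (only_my_marker : Bool), Dom_count_marker_one_line board positions pos start_idx end_idx only_my_marker → Pre_count_marker_one_line board positions pos start_idx end_idx only_my_marker → Spec_count_marker_one_line board positions pos start_idx end_idx only_my_marker (count_marker_one_line board positions pos start_idx end_idx only_my_marker)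

-- ===== LEMMAS AND PROOFS =====

-- Once start_cnt is true, A's loop just adds the tallies of 2s and 4s in the gathered markers.
theorem pvALoop_true_eq_counts (board : List (Int × Int)) (positions : List Int) (pos : Int) :
    ∀ (fuel : Nat) (i cnt op_cnt : Int),
      pvALoop board positions pos fuel i cnt op_cnt true =
        (cnt + ((pvGather board positions pos fuel i).count 2 : Int),
         op_cnt + ((pvGather board positions pos fuel i).count 4 : Int)) := by
  intro fuel
  induction fuel with
  | zero => intro i cnt op_cnt; simp [pvALoop, pvGather]
  | succ fuel ih =>
    intro i cnt op_cnt
    simp only [pvALoop, pvGather]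
    split_ifs with h1 h2 h3 <;>
      simp_all <;> ring

-- A's loop from the initial (0,0,false) state equals: find the first 0 in the gathered
-- markers, then tally 2s and 4s after it (no 0 found → (0,0)).
theorem pvALoop_false_eq_query (board : List (Int × Int)) (positions : List Int) (pos : Int) :
    ∀ (fuel : Nat) (i : Int),
      pvALoop board positions pos fuel i 0 0 false =
        (match PySem.List.index? (pvGather board positions pos fuel i) 0 with
         | none => (0, 0)
         | some k =>
           ((((pvGather board positions pos fuel i).drop (k + 1)).count 2 : Int),
            (((pvGather board positions pos fuel i).drop (k + 1)).count 4 : Int))) := by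
  intro fuel
  induction fuel with
  | zero => intro i; simp [pvALoop, pvGather, PySem.List.index?]
  | succ fuel ih =>
    intro i
    simp only [pvALoop, pvGather, Bool.false_eq_true, if_false]
    by_cases h1 : (PySem.List.pyGet? positions i).getD 0 = pos
    · simp [h1, PySem.List.index?]
    · rw [if_neg h1, if_neg h1]
      by_cases h0 : ((PySem.Dict.mk board).get? ((PySem.List.pyGet? positions i).getD 0)).getD (-1) = 0
      · rw [if_pos h0, h0, pvALoop_true_eq_counts, PySem.List.index?_cons_self]
        simp
      · rw [if_neg h0, ih, PySem.List.index?_cons_of_ne _ h0]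
        cases PySem.List.index? (pvGather board positions pos fuel (i + 1)) 0 with
        | none => simp
        | some k => simp

-- slice markers[k+1:] is drop (k+1)
theorem pvSlice_drop (markers : List Int) (k : Nat) :
    PySem.List.slice markers (some ((k : Int) + 1)) none = markers.drop (k + 1) := by
  have h : ((k : Int) + 1) = (((k + 1 : Nat) : Int)) := by push_cast; ring
  rw [h, PySem.List.slice_from_natCast]

-- ===== VERDICT =====
theorem count_marker_one_line_spec : Claim_equal_count_marker_one_line := by
  unfold Claim_equal_count_marker_one_line
  intro board positions pos start_idx end_idx only_my_marker _ _
  unfold Spec_count_marker_one_line count_marker_one_line count_marker_one_line_alt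
  rw [pvALoop_false_eq_query]
  cases hk : PySem.List.index? (pvGather board positions pos (end_idx - start_idx).toNat start_idx) 0 with
  | none => rw [PySem.List.index?_eq_idxOf?] at hk; simp [hk]
  | some k => rw [PySem.List.index?_eq_idxOf?] at hk; simp [hk, pvSlice_drop]
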